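-- pv_equiv track=rewrite | github.com/iamfrez/mostly-exercises | similarity.py | usernameDisparity
-- ===== SOURCE A (Python) =====
-- def usernameDisparity(inputs):
--     # Write your code here:
--     result = []
--     for word in inputs:
--         suffixes = []
--         nums = []
--         [suffixes.append(word[i:]) for i in range(1, len(word))]
--         for s in suffixes:
--             similarity = 0
--             for a, b in zip(word, s):
--                 if a == b:
--                     similarity += 1
--             nums.append(similarity)
--         nums.append(len(word))
--         result.append(sum(nums))
--     return result
-- ===== SOURCE B (Python) =====
-- def usernameDisparity(inputs):
--     result = []
--     for word in inputs:
--         counts = {}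
--         for ch in word:
--             counts[ch] = counts.get(ch, 0) + 1
--         total = len(word)
--         for c in counts.values():
--             total += c * (c - 1) // 2
--         result.append(total)
--     return result
-- ===== Notes on version B (the rewrite author's own statement) =====
-- stated objective: faster
-- what changed: Replaces the per-word quadratic suffix comparison (build every suffix, count matching positions against the word) by a single frequency-count pass: the answer per word is len(word) plus sum of c*(c-1)//2 over character counts, since summed matching positions across all proper suffixes count exactly the pairs of equal characters.
import Mathlib
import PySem

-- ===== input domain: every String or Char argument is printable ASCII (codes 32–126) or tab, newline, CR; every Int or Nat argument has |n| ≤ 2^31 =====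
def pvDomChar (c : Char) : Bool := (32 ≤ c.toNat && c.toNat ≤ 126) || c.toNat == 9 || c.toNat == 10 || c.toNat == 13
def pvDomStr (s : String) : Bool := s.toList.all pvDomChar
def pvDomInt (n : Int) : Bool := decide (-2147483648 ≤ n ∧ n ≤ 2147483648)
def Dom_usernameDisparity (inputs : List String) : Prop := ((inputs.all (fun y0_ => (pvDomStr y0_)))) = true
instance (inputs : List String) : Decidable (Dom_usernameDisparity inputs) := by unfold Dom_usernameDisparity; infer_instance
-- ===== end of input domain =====

-- B replaces A's quadratic per-word suffix scan by one frequency-count pass (len + Σ c*(c-1)//2): asymptotically faster.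

-- ===== PORT A =====
def usernameDisparity (inputs : List String) : List Int :=
  inputs.foldl (fun result word =>
    let cs := word.toList
    let suffixes := (PySem.List.pyRange 1 (PySem.Str.len word) 1).foldl
      (fun suffixes i => suffixes ++ [PySem.List.slice cs (some i) none]) []
    let nums := suffixes.foldl (fun nums s =>
      nums ++ [(cs.zip s).foldl (fun sim ab => if ab.1 == ab.2 then sim + 1 else sim) (0 : Int)]) []
    let nums := nums ++ [PySem.Str.len word]
    result ++ [nums.sum]) []

-- ===== PORT B =====
def usernameDisparity_alt (inputs : List String) : List Int :=
  inputs.foldl (fun result word =>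
    let cs := word.toList
    let counts : PySem.Dict Char Int :=
      cs.foldl (fun d ch => d.insert ch (d.getD ch 0 + 1)) PySem.Dict.empty
    let total := counts.values.foldl
      (fun total c => total + PySem.Int.floordiv (c * (c - 1)) 2) (PySem.Str.len word)
    result ++ [total]) []

-- ===== PRECONDITION & SPEC =====
def Spec_usernameDisparity (inputs : List String) (out : List Int) : Prop := out = usernameDisparity_alt inputs
instance (inputs : List String) (out : List Int) : Decidable (Spec_usernameDisparity inputs out) := by unfold Spec_usernameDisparity; infer_instance

-- ===== CLAIM (what is proved, stated in full; the proofs are below) =====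
def Claim_equal_usernameDisparity : Prop := ∀ (inputs : List String), Dom_usernameDisparity inputs → Spec_usernameDisparity inputs (usernameDisparity inputs)

-- ===== LEMMAS AND PROOFS =====

-- number of matching positions of zip(w, s)
def pvZ (w s : List Char) : Int := ((w.zip s).countP (fun ab => ab.1 == ab.2) : Int)

-- the non-empty suffixes of a word, longest first
def pvTails : List Char → List (List Char)
  | [] => []
  | y :: s => (y :: s) :: pvTails s

-- number of pairs i < j with cs[i] = cs[j]
def pvPairs : List Char → Nat
  | [] => 0
  | x :: t => t.count x + pvPairs t

-- A's per-word sum over proper suffixes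
def pvSA : List Char → Int
  | [] => 0
  | x :: t => ((pvTails t).map (pvZ (x :: t))).sum

def pvC2 (c : Int) : Int := PySem.Int.floordiv (c * (c - 1)) 2

theorem pvTails_heads (t : List Char) : (pvTails t).map List.headI = t := by
  induction t with
  | nil => rfl
  | cons y s ih => simp [pvTails, ih]

theorem pvTails_map_tail (y : Char) (s : List Char) :
    (pvTails (y :: s)).map List.tail = pvTails s ++ [[]] := by
  induction s generalizing y with
  | nil => rfl
  | cons z s ih =>
    have h0 : pvTails (y :: z :: s) = (y :: z :: s) :: pvTails (z :: s) := rfl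
    rw [h0, List.map_cons, List.tail_cons, ih z]
    rfl

theorem pvMem_tails_ne_nil {u : List Char} {t : List Char} (h : u ∈ pvTails t) : u ≠ [] := by
  induction t with
  | nil => simp [pvTails] at h
  | cons y s ih =>
    simp only [pvTails, List.mem_cons] at h
    rcases h with h | h
    · simp [h]
    · exact ih h

theorem pvRange_drop (t : List Char) :
    (List.range t.length).map (fun k => t.drop k) = pvTails t := by
  induction t with
  | nil => rfl
  | cons y s ih =>
    rw [List.length_cons, List.range_succ_eq_map]
    simp only [List.map_cons, List.drop_zero, List.map_map]
    rw [pvTails, ← ih]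
    congr 1

theorem pvZ_cons (x h : Char) (t r : List Char) :
    pvZ (x :: t) (h :: r) = (if x == h then 1 else 0) + pvZ t r := by
  simp only [pvZ, List.zip_cons_cons, List.countP_cons]
  by_cases hx : x = h <;> simp [hx] <;> omega

theorem pvZ_nil (w : List Char) : pvZ w [] = 0 := by
  simp [pvZ]

theorem pvTails_sum_tail (t : List Char) :
    ((pvTails t).map (fun u => pvZ t u.tail)).sum = pvSA t := by
  cases t with
  | nil => rfl
  | cons y s =>
    have : (pvTails (y :: s)).map (fun u => pvZ (y :: s) u.tail)
        = ((pvTails (y :: s)).map List.tail).map (pvZ (y :: s)) := by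
      rw [List.map_map]; rfl
    rw [this, pvTails_map_tail]
    simp [pvSA, pvZ_nil]

theorem pvSA_cons (x : Char) (t : List Char) :
    pvSA (x :: t) = (t.count x : Int) + pvSA t := by
  have hcongr : ∀ u ∈ pvTails t,
      pvZ (x :: t) u = (if x == u.headI then 1 else 0) + pvZ t u.tail := by
    intro u hu
    cases u with
    | nil => exact absurd rfl (pvMem_tails_ne_nil hu)
    | cons h r => simp [pvZ_cons, List.headI]
  rw [pvSA, List.map_congr_left hcongr, PySem.List.sum_map_add_int]
  congr 1
  · have : (pvTails t).map (fun u => if x == u.headI then (1:Int) else 0)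
        = ((pvTails t).map List.headI).map (fun h => if x == h then (1:Int) else 0) := by
      rw [List.map_map]; rfl
    rw [this, pvTails_heads, PySem.List.sum_map_ite_one_zero]
    have : t.countP (fun h => x == h) = t.count x := by
      simp only [List.count]
      exact List.countP_congr (by intro a _; simp [BEq.comm])
    rw [this]
  · exact pvTails_sum_tail t

theorem pvSA_eq_pairs (cs : List Char) : pvSA cs = (pvPairs cs : Int) := by
  induction cs with
  | nil => rfl
  | cons x t ih => rw [pvSA_cons, ih, pvPairs]; push_cast; ring

theorem pvPairs_snoc (t : List Char) (x : Char) :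
    pvPairs (t ++ [x]) = pvPairs t + t.count x := by
  induction t with
  | nil => simp [pvPairs]
  | cons a t ih =>
    simp only [List.cons_append, pvPairs, ih, List.count_append, List.count_cons,
      List.count_nil]
    by_cases hax : a = x
    · subst hax; simp; omega
    · simp only [beq_false_of_ne hax, beq_false_of_ne (Ne.symm hax)]
      omega

theorem pvC2_natCast (m : Nat) : pvC2 ((m : Nat) : Int) = (m.choose 2 : Int) := by
  cases m with
  | zero => decide
  | succ k =>
    have h1 : ((k+1 : Nat) : Int) * (((k+1 : Nat) : Int) - 1) = (((k+1) * k : Nat) : Int) := by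
      push_cast; ring
    have h2 : PySem.Int.floordiv (((k+1)*k : Nat) : Int) 2 = (((k+1)*k/2 : Nat) : Int) := by
      exact_mod_cast PySem.Int.floordiv_natCast ((k+1)*k) 2
    rw [pvC2, h1, h2]
    congr 1
    rw [Nat.choose_two_right]
    simp

theorem pvC2_succ_sub (m : Nat) :
    pvC2 (((m + 1 : Nat) : Int)) - pvC2 ((m : Nat) : Int) = (m : Int) := by
  rw [pvC2_natCast, pvC2_natCast]
  have : (m + 1).choose 2 = m.choose 2 + m := by
    rw [Nat.choose_succ_succ]
    simp [Nat.choose_one_right, Nat.add_comm]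
  rw [this]; push_cast; ring

-- sum over a nodup list after changing the function at one member
theorem pvSum_update (S : List Char) (hnd : S.Nodup) (x : Char) (hx : x ∈ S)
    (f g : Char → Int) (h : ∀ c ∈ S, c ≠ x → f c = g c) :
    (S.map g).sum = (S.map f).sum + (g x - f x) := by
  induction S with
  | nil => simp at hx
  | cons a S ih =>
    rcases List.mem_cons.mp hx with rfl | hxS
    · have hfg : ∀ c ∈ S, f c = g c := by
        intro c hc
        exact h c (List.mem_cons_of_mem _ hc) (fun hce => (List.nodup_cons.mp hnd).1 (hce ▸ hc))
      simp only [List.map_cons, List.sum_cons]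
      rw [List.map_congr_left (fun c hc => (hfg c hc).symm)]
      ring
    · have hax : a ≠ x := fun hax => (List.nodup_cons.mp hnd).1 (hax ▸ hxS)
      simp only [List.map_cons, List.sum_cons]
      rw [ih (List.nodup_cons.mp hnd).2 hxS
        (fun c hc hcx => h c (List.mem_cons_of_mem _ hc) hcx),
        h a (List.mem_cons_self) hax]
      ring

theorem pvB_sum (cs : List Char) :
    ((PySem.Set.ofList cs).map (fun k => pvC2 ((cs.count k : Nat) : Int))).sum
      = (pvPairs cs : Int) := by
  induction cs using List.reverseRecOn with
  | nil => rfl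
  | append_singleton t x ih =>
    have hset : PySem.Set.ofList (t ++ [x]) = PySem.Set.add (PySem.Set.ofList t) x := by
      rw [PySem.Set.ofList_eq_foldl, PySem.Set.ofList_eq_foldl, List.foldl_append]
      rfl
    by_cases hx : x ∈ t
    · have hadd : PySem.Set.add (PySem.Set.ofList t) x = PySem.Set.ofList t := by
        simp [PySem.Set.add, PySem.Set.contains, PySem.Set.mem_ofList, hx]
      rw [hset, hadd]
      rw [pvSum_update (PySem.Set.ofList t) (PySem.Set.nodup_ofList t) x
        ((PySem.Set.mem_ofList t x).mpr hx)
        (fun k => pvC2 ((t.count k : Nat) : Int))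
        (fun k => pvC2 (((t ++ [x]).count k : Nat) : Int))
        (by
          intro c _ hcx
          simp [List.count_append, Ne.symm hcx])]
      rw [ih, pvPairs_snoc]
      have hcx : (t ++ [x]).count x = t.count x + 1 := by
        simp [List.count_append]
      rw [hcx, pvC2_succ_sub]
      push_cast; ring
    · have hadd : PySem.Set.add (PySem.Set.ofList t) x = PySem.Set.ofList t ++ [x] := by
        simp [PySem.Set.add, PySem.Set.contains, PySem.Set.mem_ofList, hx]
      rw [hset, hadd, List.map_append, List.sum_append]
      have hterm : (t ++ [x]).count x = 1 := by
        simp [List.count_append, List.count_eq_zero_of_not_mem hx]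
      have hrest : (PySem.Set.ofList t).map (fun k => pvC2 (((t ++ [x]).count k : Nat) : Int))
          = (PySem.Set.ofList t).map (fun k => pvC2 ((t.count k : Nat) : Int)) := by
        apply List.map_congr_left
        intro c hc
        have hcx : c ≠ x := fun hce => hx (hce ▸ (PySem.Set.mem_ofList t c).mp hc)
        simp [List.count_append, Ne.symm hcx]
      have h1 : pvC2 (((t ++ [x]).count x : Nat) : Int) = 0 := by
        rw [hterm]; decide
      simp only [List.map_cons, List.map_nil, List.sum_cons, List.sum_nil, h1]
      rw [hrest, ih, pvPairs_snoc, List.count_eq_zero_of_not_mem hx]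
      simp

-- A's per-word value equals pvSA after normalising range/slice
theorem pvA_word (cs : List Char) :
    ((List.range ((cs.length : Int) - 1).toNat).map
      (fun k => pvZ cs (cs.drop (1 + k)))).sum = pvSA cs := by
  cases cs with
  | nil => rfl
  | cons x t =>
    have hlen : (((x :: t).length : Int) - 1).toNat = t.length := by
      simp
    rw [hlen]
    have : (List.range t.length).map (fun k => pvZ (x :: t) ((x :: t).drop (1 + k)))
        = ((List.range t.length).map (fun k => t.drop k)).map (pvZ (x :: t)) := by
      rw [List.map_map]
      apply List.map_congr_left
      intro k _
      simp [Nat.add_comm 1 k]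
    rw [this, pvRange_drop]
    rfl

-- per-word equality of the two programs
theorem pvWord_eq (word : String) :
    (((PySem.List.pyRange 1 (PySem.Str.len word) 1).foldl
        (fun suffixes i => suffixes ++ [PySem.List.slice word.toList (some i) none]) []).foldl
      (fun nums s =>
        nums ++ [(word.toList.zip s).foldl
          (fun sim ab => if ab.1 == ab.2 then sim + 1 else sim) (0 : Int)]) []
      ++ [PySem.Str.len word]).sum
    = ((word.toList.foldl (fun d ch => d.insert ch (d.getD ch 0 + 1))
        (PySem.Dict.empty : PySem.Dict Char Int)).values).foldl
      (fun total c => total + PySem.Int.floordiv (c * (c - 1)) 2) (PySem.Str.len word) := by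
  have hlen : PySem.Str.len word = (word.toList.length : Int) := by
    simp [PySem.Str.len_eq]
  rw [PySem.List.foldl_append_singleton_eq_map, List.nil_append,
      PySem.List.foldl_append_singleton_eq_map, List.nil_append,
      PySem.Dict.foldl_insert_getD_add_one_eq_counter,
      PySem.List.foldl_add, List.map_map, hlen, PySem.List.pyRange_one, List.map_map]
  have hA : List.map
        (((fun s => List.foldl (fun sim ab => if (ab.1 == ab.2) = true then sim + 1 else sim)
              (0 : Int) (word.toList.zip s)) ∘
            fun i => PySem.List.slice word.toList (some i) none) ∘
          fun (k : Nat) => 1 + (k : Int))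
        (List.range ((word.toList.length : Int) - 1).toNat)
      = List.map (fun k => pvZ word.toList (word.toList.drop (1 + k)))
          (List.range ((word.toList.length : Int) - 1).toNat) := by
    apply List.map_congr_left
    intro k _
    have h1 : (1 : Int) + (k : Int) = ((1 + k : Nat) : Int) := by push_cast; ring
    simp only [Function.comp_apply, h1, PySem.List.slice_from_natCast]
    rw [PySem.List.foldl_if_add_one (fun ab : Char × Char => ab.1 == ab.2)]
    simp [pvZ]
  have hB : (PySem.Dict.counter word.toList).values.map
        (fun c => PySem.Int.floordiv (c * (c - 1)) 2)
      = (PySem.Set.ofList word.toList).map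
          (fun k => pvC2 ((word.toList.count k : Nat) : Int)) := by
    show ((PySem.Dict.counter word.toList).items.map (·.2)).map
        (fun c => PySem.Int.floordiv (c * (c - 1)) 2) = _
    rw [PySem.Dict.items_counter, List.map_map, List.map_map]
    rfl
  rw [hA, hB, pvB_sum, List.sum_append, List.sum_singleton, pvA_word, pvSA_eq_pairs]
  ring

theorem pvFold_eq (l : List String) (acc : List Int) :
    l.foldl (fun result word =>
      result ++ [(((PySem.List.pyRange 1 (PySem.Str.len word) 1).foldl
          (fun suffixes i => suffixes ++ [PySem.List.slice word.toList (some i) none]) []).foldl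
        (fun nums s =>
          nums ++ [(word.toList.zip s).foldl
            (fun sim ab => if ab.1 == ab.2 then sim + 1 else sim) (0 : Int)]) []
        ++ [PySem.Str.len word]).sum]) acc
    = l.foldl (fun result word =>
      result ++ [((word.toList.foldl (fun d ch => d.insert ch (d.getD ch 0 + 1))
          (PySem.Dict.empty : PySem.Dict Char Int)).values).foldl
        (fun total c => total + PySem.Int.floordiv (c * (c - 1)) 2) (PySem.Str.len word)]) acc := by
  induction l generalizing acc with
  | nil => rfl
  | cons w l ih =>
    simp only [List.foldl_cons]
    rw [pvWord_eq w]
    exact ih _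

-- ===== VERDICT (by name: the statement is the Claim_ definition above) =====
theorem usernameDisparity_spec : Claim_equal_usernameDisparity := by
  intro inputs _
  unfold Spec_usernameDisparity usernameDisparity usernameDisparity_alt
  exact pvFold_eq inputs []
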